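-- pv_equiv track=rewrite | github.com/MrBrantCode/unitest_baseline | mut_generate/mist_train_cf/cf_102868/solution.py | find_min_element_frequency
-- ===== SOURCE A (Python) =====
-- def find_min_element_frequency(arr):
--     """
--     This function takes an array of integers as input, and returns the minimum element and its frequency.
--
--     Args:
--         arr (list): A list of integers.
--
--     Returns:
--         tuple: A tuple containing the minimum element and its frequency.
--     """
--     min_element = float('inf')
--     element_frequency = {}
--
--     # Iterate through each element in the array to find the minimum element and update its frequency
--     for num in arr:
--         if num < min_element:
--             min_element = num
--         element_frequency[num] = element_frequency.get(num, 0) + 1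
--
--     # Find the maximum frequency
--     frequency = max(element_frequency.values())
--
--     return min_element, frequency
-- ===== SOURCE B (Python) =====
-- def find_min_element_frequency(arr):
--     """Return (minimum element, maximum frequency of any element).
--
--     Sort-and-scan re-implementation: the maximum frequency equals the
--     longest run of equal consecutive elements in a sorted copy of arr.
--     """
--     min_element = min(arr)
--     s = sorted(arr)
--     best = 1
--     run = 1
--     for prev, cur in zip(s, s[1:]):
--         if cur == prev:
--             run += 1
--             if run > best:
--                 best = run
--         else:
--             run = 1
--     return min_element, best
-- ===== Notes on version B (the rewrite author's own statement) =====
-- stated objective: alternative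
-- what changed: Replaces A's hash-table frequency dictionary (count every element, then max of the dict values) with min(arr) plus a sort-then-scan that tracks the longest run of equal consecutive elements in a sorted copy, which equals the maximum frequency.
import Mathlib
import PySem

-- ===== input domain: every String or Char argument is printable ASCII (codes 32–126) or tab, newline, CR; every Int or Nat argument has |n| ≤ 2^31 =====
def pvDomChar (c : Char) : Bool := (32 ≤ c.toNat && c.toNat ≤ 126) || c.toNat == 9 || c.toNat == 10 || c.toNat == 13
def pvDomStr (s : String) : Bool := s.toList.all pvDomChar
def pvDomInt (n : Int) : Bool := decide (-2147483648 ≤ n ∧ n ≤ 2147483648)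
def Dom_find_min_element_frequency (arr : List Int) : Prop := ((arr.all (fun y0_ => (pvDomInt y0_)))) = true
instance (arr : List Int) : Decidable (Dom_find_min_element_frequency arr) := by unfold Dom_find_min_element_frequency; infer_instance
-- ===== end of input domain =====

-- B replaces A's dict-of-counts by min() plus a sort-then-longest-run scan (alternative decomposition, same result).

-- ===== PORT A =====
-- One pass keeping (running min as Option Int, 'none' = float('inf')) and a frequency dict;
-- then max of the dict's values (max([]) raises ValueError on empty arr — excluded by Pre_).
def find_min_element_frequency (arr : List Int) : Int × Int :=
  let st := arr.foldl
    (fun (st : Option Int × PySem.Dict Int Int) num =>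
      ((if st.1.elim true (fun m => num < m) then some num else st.1),
       st.2.insert num (st.2.getD num 0 + 1)))
    (none, PySem.Dict.empty)
  match PySem.List.max? st.2.values (fun v => v) with
  | none => (0, 0)          -- unreachable under Pre_: Python raises ValueError here
  | some f => (st.1.getD 0, f)

-- ===== PORT B =====
def find_min_element_frequency_alt (arr : List Int) : Int × Int :=
  match PySem.List.min? arr (fun x => x) with
  | none => (0, 0)          -- unreachable under Pre_: min([]) raises ValueError
  | some m =>
    let s := PySem.List.sorted arr (fun x => x) false
    let st := (s.zip (s.drop 1)).foldl
      (fun (st : Int × Int) pc =>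
        if pc.2 = pc.1 then
          let run := st.2 + 1
          (if run > st.1 then run else st.1, run)
        else (st.1, 1))
      (1, 1)
    (m, st.1)

-- ===== PRECONDITION & SPEC =====
-- A raises ValueError (max of an empty sequence) exactly on the empty list; B's min([]) raises too.
def Pre_find_min_element_frequency (arr : List Int) : Prop := arr ≠ []
instance (arr : List Int) : Decidable (Pre_find_min_element_frequency arr) := by unfold Pre_find_min_element_frequency; infer_instance
def pvWitness_find_min_element_frequency : List Int := [3, 1, 2, 1, 3, 3]

def Spec_find_min_element_frequency (arr : List Int) (out : Int × Int) : Prop := out = find_min_element_frequency_alt arr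
instance (arr : List Int) (out : Int × Int) : Decidable (Spec_find_min_element_frequency arr out) := by unfold Spec_find_min_element_frequency; infer_instance

-- ===== CLAIM (what is proved, stated in full; the proofs are below) =====
def Claim_equal_find_min_element_frequency : Prop := ∀ (arr : List Int), Dom_find_min_element_frequency arr → Pre_find_min_element_frequency arr → Spec_find_min_element_frequency arr (find_min_element_frequency arr)

-- ===== LEMMAS AND PROOFS =====

-- ----- min part -----
theorem optMin_foldl_some (t : List Int) : ∀ m : Int,
    t.foldl (fun (st : Option Int) num => if st.elim true (fun m => num < m) then some num else st) (some m)
      = some (t.foldl min m) := by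
  induction t with
  | nil => intro m; rfl
  | cons c t ih =>
    intro m
    rw [List.foldl_cons, List.foldl_cons]
    have hstep : (if ((some m).elim true fun v => decide (c < v)) = true then some c else some m)
        = some (min m c) := by
      simp only [Option.elim_some, decide_eq_true_eq]
      split_ifs with h
      · simp [le_of_lt h]
      · rw [not_lt] at h
        simp [min_def, h]
    rw [hstep, ih]

-- ----- scan via an explicit recursion -----
def maxRun (run prev : Int) : List Int → Int
  | [] => run
  | c :: t => if c = prev then maxRun (run + 1) prev t else max (maxRun 1 c t) run

def goScan (best run prev : Int) : List Int → Int
  | [] => best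
  | c :: t => if c = prev then goScan (max best (run + 1)) (run + 1) prev t
              else goScan best 1 c t

theorem foldl_zip_eq_goScan (t : List Int) : ∀ (prev best run : Int),
    (((prev :: t).zip t).foldl
      (fun (st : Int × Int) pc =>
        if pc.2 = pc.1 then
          ((if st.2 + 1 > st.1 then st.2 + 1 else st.1), st.2 + 1)
        else (st.1, 1)) (best, run)).1
      = goScan best run prev t := by
  induction t with
  | nil => intro prev best run; rfl
  | cons c t ih =>
    intro prev best run
    rw [List.zip_cons_cons, List.foldl_cons]
    have hmx : (if run + 1 > best then run + 1 else best) = max best (run + 1) := by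
      rw [max_def]; split_ifs <;> omega
    by_cases h : c = prev
    · show (List.foldl _ (if c = prev then ((if run + 1 > best then run + 1 else best), run + 1) else (best, 1)) ((c :: t).zip t)).1 = _
      rw [if_pos h, hmx]
      simp only [goScan]
      rw [if_pos h, ← h]
      exact ih c (max best (run + 1)) (run + 1)
    · show (List.foldl _ (if c = prev then ((if run + 1 > best then run + 1 else best), run + 1) else (best, 1)) ((c :: t).zip t)).1 = _
      rw [if_neg h]
      simp only [goScan]
      rw [if_neg h]
      exact ih c best 1

theorem run_le_maxRun (t : List Int) : ∀ run prev, run ≤ maxRun run prev t := by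
  induction t with
  | nil => intro run prev; simp [maxRun]
  | cons c t ih =>
    intro run prev
    simp only [maxRun]
    by_cases h : c = prev
    · simp only [if_pos h]; have := ih (run + 1) prev; omega
    · simp [if_neg h]

theorem goScan_eq_max_maxRun (t : List Int) : ∀ best run prev, 1 ≤ run → run ≤ best →
    goScan best run prev t = max best (maxRun run prev t) := by
  induction t with
  | nil => intro best run prev _ h; simp [goScan, maxRun]; omega
  | cons c t ih =>
    intro best run prev h1 h
    simp only [goScan, maxRun]
    by_cases hc : c = prev
    · simp only [if_pos hc]
      rw [ih _ _ _ (by omega) (le_max_right _ _)]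
      have := run_le_maxRun t (run + 1) prev
      rw [max_def, max_def, max_def]
      split_ifs <;> omega
    · simp only [if_neg hc]
      rw [ih _ _ _ (by omega) (by omega : (1:Int) ≤ best)]
      have := run_le_maxRun t 1 c
      rw [max_def, max_def, max_def]
      split_ifs <;> omega

-- characterization of maxRun on a sorted tail
theorem maxRun_spec (t : List Int) : ∀ prev run, (prev :: t).Pairwise (· ≤ ·) →
    (run + t.count prev ≤ maxRun run prev t)
    ∧ (∀ y ∈ t, y ≠ prev → (t.count y : Int) ≤ maxRun run prev t)
    ∧ (maxRun run prev t = run + t.count prev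
       ∨ ∃ y ∈ t, y ≠ prev ∧ maxRun run prev t = t.count y) := by
  induction t with
  | nil => intro prev run _; simp [maxRun]
  | cons c t ih =>
    intro prev run hp
    rcases List.pairwise_cons.mp hp with ⟨h1, hpt⟩
    by_cases hc : c = prev
    · subst hc
      have H := ih c (run + 1) hpt
      have hstep : maxRun run c (c :: t) = maxRun (run + 1) c t := by
        simp [maxRun]
      rw [hstep]
      have hcc : (List.count c (c :: t) : Int) = 1 + t.count c := by
        simp [List.count_cons]; push_cast; omega
      refine ⟨?_, ?_, ?_⟩
      · rw [hcc]; have := H.1; omega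
      · intro y hy hne
        have hyt : y ∈ t := by
          rcases List.mem_cons.mp hy with h | h
          · exact absurd h hne
          · exact h
        have h2 := H.2.1 y hyt hne
        have hcy : List.count y (c :: t) = t.count y := by
          simp [List.count_cons, hne, Ne.symm hne]
        rw [hcy]; omega
      · rcases H.2.2 with h | ⟨y, hy, hne, he⟩
        · left; rw [hcc, h]; omega
        · right
          exact ⟨y, List.mem_cons_of_mem _ hy, hne, by
            rw [he]
            have hcy : List.count y (c :: t) = t.count y := by
              simp [List.count_cons, hne, Ne.symm hne]
            rw [hcy]⟩
    · have hpc : prev < c := lt_of_le_of_ne (h1 c List.mem_cons_self) (fun e => hc e.symm)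
      have hlt : ∀ y ∈ c :: t, prev < y := by
        intro y hy
        rcases List.mem_cons.mp hy with h | h
        · exact h ▸ hpc
        · exact lt_of_lt_of_le hpc ((List.pairwise_cons.mp hpt).1 y h)
      have hnot : prev ∉ c :: t := fun hm => lt_irrefl prev (hlt prev hm)
      have hcnt0 : List.count prev (c :: t) = 0 := List.count_eq_zero.mpr hnot
      have H := ih c 1 hpt
      have hcc : (List.count c (c :: t) : Int) = 1 + t.count c := by
        simp [List.count_cons]; push_cast; omega
      simp only [maxRun, if_neg hc]
      refine ⟨?_, ?_, ?_⟩
      · rw [hcnt0]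
        simpa using le_max_right (maxRun 1 c t) run
      · intro y hy hne
        by_cases hyc : y = c
        · subst hyc
          rw [hcc]
          exact le_trans H.1 (le_max_left _ _)
        · have hyt : y ∈ t := by
            rcases List.mem_cons.mp hy with h | h
            · exact absurd h hyc
            · exact h
          have h2 := H.2.1 y hyt hyc
          have hcy : List.count y (c :: t) = t.count y := by
            simp [List.count_cons, hyc, Ne.symm hyc]
          rw [hcy]
          exact le_trans h2 (le_max_left _ _)
      · by_cases hbig : maxRun 1 c t ≤ run
        · left
          rw [hcnt0, max_eq_right hbig]
          simp
        · rw [not_le] at hbig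
          have hmx : max (maxRun 1 c t) run = maxRun 1 c t := max_eq_left (le_of_lt hbig)
          rcases H.2.2 with h | ⟨y, hy, hne, he⟩
          · right
            refine ⟨c, List.mem_cons_self, fun e => hc e, ?_⟩
            rw [hmx, h]
            omega
          · right
            refine ⟨y, List.mem_cons_of_mem _ hy, fun e => ?_, ?_⟩
            · exact lt_irrefl prev (e ▸ hlt y (List.mem_cons_of_mem _ hy))
            · rw [hmx, he]
              have hcy : List.count y (c :: t) = t.count y := by
                simp [List.count_cons, hne, Ne.symm hne]
              rw [hcy]

-- B's frequency component: exists as a count and bounds all counts (over arr, via perm with sorted arr)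
theorem alt_freq_spec (arr : List Int) (x : Int) (t : List Int)
    (hs : PySem.List.sorted arr (fun y => y) false = x :: t) :
    (∃ w ∈ arr, (arr.count w : Int) = goScan 1 1 x t)
    ∧ (∀ y ∈ arr, (arr.count y : Int) ≤ goScan 1 1 x t) := by
  have hperm : (x :: t).Perm arr := hs ▸ PySem.List.sorted_perm arr (fun y => y) false
  have hpair : (x :: t).Pairwise (· ≤ ·) := by
    have := PySem.List.sorted_pairwise arr (fun y => y)
    rw [hs] at this; exact this
  have hcount : ∀ y, arr.count y = (x :: t).count y := fun y => (hperm.count_eq y).symm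
  have hgo : goScan 1 1 x t = maxRun 1 x t := by
    rw [goScan_eq_max_maxRun t 1 1 x le_rfl le_rfl]
    have := run_le_maxRun t 1 x
    omega
  have hm := maxRun_spec t x 1 hpair
  constructor
  · rcases hm.2.2 with h | ⟨y, hy, hne, he⟩
    · refine ⟨x, hperm.mem_iff.mp List.mem_cons_self, ?_⟩
      rw [hcount x, hgo, h]; simp [List.count_cons]; push_cast; omega
    · refine ⟨y, hperm.mem_iff.mp (List.mem_cons_of_mem _ hy), ?_⟩
      rw [hcount y, hgo, he]; simp [List.count_cons, hne, Ne.symm hne]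
  · intro y hy
    rw [hcount y, hgo]
    by_cases hyx : y = x
    · subst hyx
      have := hm.1
      simp [List.count_cons]; push_cast; omega
    · have hyt : y ∈ x :: t := hperm.mem_iff.mpr hy
      rcases List.mem_cons.mp hyt with h | h
      · exact absurd h hyx
      · have h2 := hm.2.1 y h hyx
        have hcy : List.count y (x :: t) = t.count y := by
          simp [List.count_cons, hyx, Ne.symm hyx]
        rw [hcy]; omega

-- A's frequency dict IS counter arr
theorem a_dict_eq_counter (arr : List Int) :
    (arr.foldl
      (fun (st : Option Int × PySem.Dict Int Int) num =>
        ((if st.1.elim true (fun m => num < m) then some num else st.1),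
         st.2.insert num (st.2.getD num 0 + 1)))
      (none, PySem.Dict.empty))
    = (arr.foldl (fun (st : Option Int) num => if st.elim true (fun m => num < m) then some num else st) none,
       PySem.Dict.counter arr) := by
  rw [← PySem.Dict.foldl_insert_getD_add_one_eq_counter]
  exact PySem.List.foldl_prod_mk
    (f := fun (st : Option Int) num => if st.elim true (fun m => num < m) then some num else st)
    (g := fun (d : PySem.Dict Int Int) num => d.insert num (d.getD num 0 + 1)) arr none PySem.Dict.empty

-- ===== VERDICT (by name: the statement is the Claim_ definition above) =====
theorem find_min_element_frequency_spec : Claim_equal_find_min_element_frequency := by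
  intro arr _ hpre
  unfold Spec_find_min_element_frequency
  obtain ⟨x0, t0, harr⟩ : ∃ x t, arr = x :: t := by
    cases arr with
    | nil => exact absurd rfl hpre
    | cons a l => exact ⟨a, l, rfl⟩
  -- sorted arr is nonempty
  obtain ⟨x, t, hs⟩ : ∃ x t, PySem.List.sorted arr (fun y => y) false = x :: t := by
    cases hso : PySem.List.sorted arr (fun y => y) false with
    | nil =>
      exfalso
      exact hpre ((PySem.List.sorted_eq_nil_iff _ _ _).mp hso)
    | cons a l => exact ⟨a, l, rfl⟩
  -- evaluate A
  unfold find_min_element_frequency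
  rw [a_dict_eq_counter]
  -- the min component
  have hmin : (arr.foldl (fun (st : Option Int) num => if st.elim true (fun m => num < m) then some num else st) none)
      = some (t0.foldl min x0) := by
    rw [harr]
    simp only [List.foldl_cons, Option.elim]
    exact optMin_foldl_some t0 x0
  have hminB : PySem.List.min? arr (fun y => y) = some (t0.foldl min x0) := by
    rw [harr]; exact PySem.List.min?_id_cons x0 t0
  -- the values list of the counter
  have hvals : (PySem.Dict.counter arr (κ := Int)).values
      = (PySem.Set.ofList arr).map (fun k => (arr.count k : Int)) := by
    show (PySem.Dict.counter arr (κ := Int)).items.map (·.2) = _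
    rw [PySem.Dict.items_counter]
    simp [List.map_map, Function.comp]
  -- A's frequency: max? of the values is some value; characterize it
  have hvne : (PySem.Dict.counter arr (κ := Int)).values ≠ [] := by
    rw [hvals, harr]
    simp [PySem.Set.ofList_cons]
  cases hmax : PySem.List.max? (PySem.Dict.counter arr (κ := Int)).values (fun v => v) with
  | none => exact absurd ((PySem.List.max?_eq_none_iff _ _).mp hmax) hvne
  | some f =>
    -- evaluate B
    unfold find_min_element_frequency_alt
    rw [hminB]
    simp only [hs, hmin, hmax]
    rw [show List.drop 1 (x :: t) = t from rfl]
    rw [foldl_zip_eq_goScan]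
    -- show f = goScan 1 1 x t via the double characterization
    have halt := alt_freq_spec arr x t hs
    have hfmem : f ∈ (PySem.Dict.counter arr (κ := Int)).values := PySem.List.max?_mem hmax
    have hfmax : ∀ v ∈ (PySem.Dict.counter arr (κ := Int)).values, v ≤ f := by
      intro v hv; exact PySem.List.max?_isMax hmax v hv
    rw [hvals] at hfmem hfmax
    obtain ⟨k, hk, hfk⟩ := List.mem_map.mp hfmem
    have hkarr : k ∈ arr := by rwa [PySem.Set.mem_ofList] at hk
    have hle1 : f ≤ goScan 1 1 x t := by
      rw [← hfk]; exact halt.2 k hkarr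
    have hle2 : goScan 1 1 x t ≤ f := by
      obtain ⟨w, hw, hwc⟩ := halt.1
      have : (arr.count w : Int) ≤ f := by
        apply hfmax
        exact List.mem_map.mpr ⟨w, by rwa [PySem.Set.mem_ofList], rfl⟩
      omega
    have hf : f = goScan 1 1 x t := le_antisymm hle1 hle2
    simp [hf]
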